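-- pv_equiv track=rewrite | github.com/darvinmahi/nq-whale-radar | update_sessions.py | get_cot_for_date
-- ===== SOURCE A (Python) =====
-- def get_cot_for_date(cot_map, date_str):
--     """Retorna el COT Index de la semana más reciente ≤ date_str."""
--     if not cot_map:
--         return None
--     weeks = sorted(cot_map.keys())
--     best  = None
--     for w in weeks:
--         if w <= date_str:
--             best = cot_map[w]
--     return best
-- ===== SOURCE B (Python) =====
-- def get_cot_for_date(cot_map, date_str):
--     """Retorna el COT Index de la semana más reciente <= date_str.
--     Single linear pass tracking the maximal key <= date_str; no sort."""
--     best_key = None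
--     best_val = None
--     for w, v in cot_map.items():
--         if w <= date_str and (best_key is None or w > best_key):
--             best_key, best_val = w, v
--     return best_val
-- ===== Notes on version B (the rewrite author's own statement) =====
-- stated objective: faster
-- what changed: Replaced sort-all-keys-then-scan with a single linear pass that tracks the maximal key <= date_str and its value: O(n) instead of O(n log n); intended as faster, measured 2.2x at n=262144 in a timing run (an earlier probe run was borderline).
import Mathlib
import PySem

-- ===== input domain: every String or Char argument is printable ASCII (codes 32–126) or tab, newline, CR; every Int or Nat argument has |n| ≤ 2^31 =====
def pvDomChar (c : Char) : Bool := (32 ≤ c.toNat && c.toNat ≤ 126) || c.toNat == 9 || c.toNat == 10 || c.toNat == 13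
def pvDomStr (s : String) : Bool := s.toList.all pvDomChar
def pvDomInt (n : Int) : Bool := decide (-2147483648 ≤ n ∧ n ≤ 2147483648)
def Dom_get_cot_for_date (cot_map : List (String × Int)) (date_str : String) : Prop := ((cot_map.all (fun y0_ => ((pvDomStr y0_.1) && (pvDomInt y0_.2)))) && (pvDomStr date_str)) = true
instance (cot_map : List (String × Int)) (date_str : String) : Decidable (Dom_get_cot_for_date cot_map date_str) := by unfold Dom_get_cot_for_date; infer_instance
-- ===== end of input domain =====

-- B replaces A's sort-then-scan with a single linear pass tracking the maximal key ≤ date_str (alternative algorithm, no sort).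


-- ===== PORT A =====
-- cot_map[w]: first-match association-list lookup (the dict subscript; w always comes from the key list, so no KeyError)
def pyDictGet : List (String × Int) → String → Option Int
  | [], _ => none
  | (k, v) :: t, w => if k = w then some v else pyDictGet t w

def get_cot_for_date (cot_map : List (String × Int)) (date_str : String) : Option Int :=
  if cot_map = [] then none
  else
    let weeks := PySem.List.sorted (cot_map.map Prod.fst) (fun x => x) false
    weeks.foldl (fun best w => if w ≤ date_str then pyDictGet cot_map w else best) none

-- ===== PORT B =====
def get_cot_for_date_alt (cot_map : List (String × Int)) (date_str : String) : Option Int :=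
  (cot_map.foldl
    (fun s p =>
      if p.1 ≤ date_str then
        match s.1 with
        | none => (some p.1, some p.2)
        | some bk => if bk < p.1 then (some p.1, some p.2) else s
      else s)
    ((none : Option String), (none : Option Int))).2

-- ===== PRECONDITION & SPEC =====
def Spec_get_cot_for_date (cot_map : List (String × Int)) (date_str : String) (out : Option Int) : Prop := out = get_cot_for_date_alt cot_map date_str
instance (cot_map : List (String × Int)) (date_str : String) (out : Option Int) : Decidable (Spec_get_cot_for_date cot_map date_str out) := by unfold Spec_get_cot_for_date; infer_instance

-- ===== CLAIM (what is proved, stated in full; the proofs are below) =====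
def Claim_equal_get_cot_for_date : Prop := ∀ (cot_map : List (String × Int)) (date_str : String), Dom_get_cot_for_date cot_map date_str → Spec_get_cot_for_date cot_map date_str (get_cot_for_date cot_map date_str)

-- ===== LEMMAS AND PROOFS =====

-- The first pair attaining the maximal key ≤ d (earliest pair wins ties).
def firstMax (d : String) : List (String × Int) → Option (String × Int)
  | [] => none
  | (w, v) :: t =>
    if w ≤ d then
      match firstMax d t with
      | none => some (w, v)
      | some (k, v') => if w < k then some (k, v') else some (w, v)
    else firstMax d t

def bstep (d : String) (s : Option String × Option Int) (p : String × Int) : Option String × Option Int :=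
  if p.1 ≤ d then
    match s.1 with
    | none => (some p.1, some p.2)
    | some bk => if bk < p.1 then (some p.1, some p.2) else s
  else s

theorem bfold_some (d : String) (m : List (String × Int)) : ∀ (k : String) (v : Option Int),
    m.foldl (bstep d) (some k, v) =
      (match firstMax d m with
       | none => (some k, v)
       | some (k', v') => if k < k' then (some k', some v') else (some k, v)) := by
  induction m with
  | nil => intro k v; simp [firstMax]
  | cons p t ih =>
    intro k v
    obtain ⟨w, v0⟩ := p
    by_cases hwd : w ≤ d
    · by_cases hkw : k < w
      · rw [List.foldl_cons, show bstep d (some k, v) (w, v0) = (some w, some v0) by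
            simp [bstep, hwd, hkw], ih]
        simp only [firstMax, if_pos hwd]
        cases hft : firstMax d t with
        | none => simp [hkw]
        | some p' =>
          obtain ⟨k', v'⟩ := p'
          by_cases hwk' : w < k'
          · simp [hwk', hkw.trans hwk']
          · simp [hwk', hkw]
      · rw [List.foldl_cons, show bstep d (some k, v) (w, v0) = (some k, v) by
            simp [bstep, hwd, hkw], ih]
        simp only [firstMax, if_pos hwd]
        cases hft : firstMax d t with
        | none => simp [hkw]
        | some p' =>
          obtain ⟨k', v'⟩ := p'
          by_cases hwk' : w < k'
          · simp [hwk']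
          · have hk'k : ¬ k < k' := fun h => hkw (lt_of_lt_of_le h (not_lt.mp hwk'))
            simp [hwk', hkw, hk'k]
    · rw [List.foldl_cons, show bstep d (some k, v) (w, v0) = (some k, v) by
            simp [bstep, hwd], ih]
      simp only [firstMax, if_neg hwd]

theorem bfold_none (d : String) (m : List (String × Int)) :
    m.foldl (bstep d) (none, none) =
      (match firstMax d m with
       | none => ((none : Option String), (none : Option Int))
       | some (k, v) => (some k, some v)) := by
  induction m with
  | nil => simp [firstMax]
  | cons p t ih =>
    obtain ⟨w, v0⟩ := p
    by_cases hwd : w ≤ d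
    · rw [List.foldl_cons, show bstep d (none, none) (w, v0) = (some w, some v0) by
          simp [bstep, hwd], bfold_some]
      simp only [firstMax, if_pos hwd]
      cases hft : firstMax d t with
      | none => simp
      | some p' =>
        obtain ⟨k', v'⟩ := p'
        by_cases hwk' : w < k' <;> simp [hwk']
    · rw [List.foldl_cons, show bstep d (none, none) (w, v0) = (none, none) by
          simp [bstep, hwd], ih]
      simp only [firstMax, if_neg hwd]

theorem firstMax_none_iff (d : String) (m : List (String × Int)) :
    firstMax d m = none ↔ ∀ p ∈ m, ¬ p.1 ≤ d := by
  induction m with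
  | nil => simp [firstMax]
  | cons p t ih =>
    obtain ⟨w, v0⟩ := p
    by_cases hwd : w ≤ d
    · simp only [firstMax, if_pos hwd]
      constructor
      · intro h
        cases hft : firstMax d t with
        | none => rw [hft] at h; simp at h
        | some p' => obtain ⟨k', v'⟩ := p'; rw [hft] at h; by_cases hc : w < k' <;> simp [hc] at h
      · intro h; exact absurd hwd (h (w, v0) (by simp))
    · simp only [firstMax, if_neg hwd]
      rw [ih]
      constructor
      · intro h p hp
        rcases List.mem_cons.mp hp with h1 | h2
        · subst h1; exact hwd
        · exact h p h2
      · intro h p hp; exact h p (List.mem_cons_of_mem _ hp)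

theorem firstMax_some (d : String) (m : List (String × Int)) (k : String) (v : Int)
    (h : firstMax d m = some (k, v)) :
    k ≤ d ∧ (∀ p ∈ m, p.1 ≤ d → p.1 ≤ k) ∧ pyDictGet m k = some v := by
  induction m generalizing k v with
  | nil => simp [firstMax] at h
  | cons p t ih =>
    obtain ⟨w, v0⟩ := p
    by_cases hwd : w ≤ d
    · simp only [firstMax, if_pos hwd] at h
      cases hft : firstMax d t with
      | none =>
        rw [hft] at h; simp at h
        obtain ⟨hk, hv⟩ := h; subst hk; subst hv
        refine ⟨hwd, ?_, by simp [pyDictGet]⟩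
        intro p hp hpd
        rcases List.mem_cons.mp hp with h1 | h2
        · subst h1; exact le_refl _
        · exact absurd hpd ((firstMax_none_iff d t).mp hft p h2)
      | some p' =>
        obtain ⟨k', v'⟩ := p'
        obtain ⟨hk'd, hmax, hget⟩ := ih k' v' hft
        rw [hft] at h
        by_cases hwk' : w < k'
        · simp only [if_pos hwk', Option.some.injEq, Prod.mk.injEq] at h
          obtain ⟨hk, hv⟩ := h; subst hk; subst hv
          refine ⟨hk'd, ?_, ?_⟩
          · intro p hp hpd
            rcases List.mem_cons.mp hp with h1 | h2
            · subst h1; exact le_of_lt hwk'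
            · exact hmax p h2 hpd
          · have hwk : w ≠ k' := ne_of_lt hwk'
            simp [pyDictGet, hwk, hget]
        · simp only [if_neg hwk', Option.some.injEq, Prod.mk.injEq] at h
          obtain ⟨hk, hv⟩ := h; subst hk; subst hv
          refine ⟨hwd, ?_, by simp [pyDictGet]⟩
          intro p hp hpd
          rcases List.mem_cons.mp hp with h1 | h2
          · subst h1; exact le_refl _
          · exact (hmax p h2 hpd).trans (not_lt.mp hwk')
    · simp only [firstMax, if_neg hwd] at h
      obtain ⟨hkd, hmax, hget⟩ := ih k v h
      refine ⟨hkd, ?_, ?_⟩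
      · intro p hp hpd
        rcases List.mem_cons.mp hp with h1 | h2
        · subst h1; exact absurd hpd hwd
        · exact hmax p h2 hpd
      · have hwk : w ≠ k := fun he => hwd (he ▸ hkd)
        simp [pyDictGet, hwk, hget]

-- generic "last assignment wins" shape of A's loop
theorem foldl_overwrite (d : String) (L : String → Option Int) :
    ∀ (ws : List String) (b : Option Int),
      ws.foldl (fun best w => if w ≤ d then L w else best) b =
        (match (ws.filter (fun w => decide (w ≤ d))).getLast? with
         | some w => L w
         | none => b) := by
  intro ws
  induction ws with
  | nil => intro b; simp
  | cons w t ih =>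
    intro b
    rw [List.foldl_cons, ih]
    by_cases hwd : w ≤ d
    · have hfc : (w :: t).filter (fun w => decide (w ≤ d)) = w :: t.filter (fun w => decide (w ≤ d)) := by
        rw [List.filter_cons, if_pos (by simpa using hwd)]
      rw [hfc]
      cases hfl : t.filter (fun w => decide (w ≤ d)) with
      | nil => exact if_pos hwd
      | cons a l =>
        rw [List.getLast?_cons_cons]
        cases h2 : (a :: l).getLast? with
        | none => simp [List.getLast?_eq_none_iff] at h2
        | some x => rfl
    · have hfc : (w :: t).filter (fun w => decide (w ≤ d)) = t.filter (fun w => decide (w ≤ d)) := by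
        rw [List.filter_cons, if_neg (by simpa using hwd)]
      rw [hfc]
      cases (t.filter (fun w => decide (w ≤ d))).getLast? with
      | none => exact if_neg hwd
      | some x => rfl

theorem pairwise_getLast_le (l : List String) (hp : l.Pairwise (· ≤ ·)) (w : String)
    (h : l.getLast? = some w) : ∀ x ∈ l, x ≤ w := by
  induction l with
  | nil => simp at h
  | cons a t ih =>
    cases t with
    | nil =>
      simp at h; subst h; simp
    | cons b t' =>
      rw [List.getLast?_cons_cons] at h
      intro x hx
      rcases List.mem_cons.mp hx with h1 | h2
      · subst h1
        have hw : w ∈ b :: t' := List.mem_of_getLast? h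
        exact (List.pairwise_cons.mp hp).1 w hw
      · exact ih (List.pairwise_cons.mp hp).2 h x h2

theorem pyDictGet_some_mem (m : List (String × Int)) (k : String) (v : Int)
    (h : pyDictGet m k = some v) : k ∈ m.map Prod.fst := by
  induction m with
  | nil => simp [pyDictGet] at h
  | cons p t ih =>
    obtain ⟨w, v0⟩ := p
    by_cases hwk : w = k
    · subst hwk; simp
    · simp [pyDictGet, hwk] at h; simp [ih h]

-- ===== VERDICT (by name: the statement is the Claim_ definition above) =====
theorem get_cot_for_date_spec : Claim_equal_get_cot_for_date := by
  intro m d _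
  unfold Spec_get_cot_for_date get_cot_for_date get_cot_for_date_alt
  rw [show (fun (s : Option String × Option Int) p =>
        if p.1 ≤ d then
          match s.1 with
          | none => (some p.1, some p.2)
          | some bk => if bk < p.1 then (some p.1, some p.2) else s
        else s) = bstep d by rfl, bfold_none]
  by_cases hm : m = []
  · subst hm; simp [firstMax]
  · rw [if_neg hm, foldl_overwrite]
    set weeks := PySem.List.sorted (m.map Prod.fst) (fun x => x) false with hweeks
    have hpw : (weeks.filter (fun w => decide (w ≤ d))).Pairwise (· ≤ ·) :=
      List.Pairwise.filter _ (PySem.List.sorted_pairwise (m.map Prod.fst) (fun x => x))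
    have hmemf : ∀ x, x ∈ weeks.filter (fun w => decide (w ≤ d)) ↔ (x ∈ m.map Prod.fst ∧ x ≤ d) := by
      intro x
      rw [List.mem_filter, PySem.List.mem_sorted]
      simp
    cases hlast : (weeks.filter (fun w => decide (w ≤ d))).getLast? with
    | none =>
      have hnil : weeks.filter (fun w => decide (w ≤ d)) = [] :=
        List.getLast?_eq_none_iff.mp hlast
      have hfm : firstMax d m = none := by
        rw [firstMax_none_iff]
        intro p hp hpd
        have : p.1 ∈ weeks.filter (fun w => decide (w ≤ d)) :=
          (hmemf p.1).mpr ⟨List.mem_map_of_mem hp, hpd⟩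
        rw [hnil] at this; simp at this
      simp [hfm]
    | some w =>
      have hwmem : w ∈ weeks.filter (fun w => decide (w ≤ d)) := List.mem_of_getLast? hlast
      obtain ⟨hwkeys, hwd⟩ := (hmemf w).mp hwmem
      obtain ⟨p0, hp0, hp0k⟩ := List.mem_map.mp hwkeys
      cases hfm : firstMax d m with
      | none =>
        exact absurd (show p0.1 ≤ d by rw [hp0k]; exact hwd) ((firstMax_none_iff d m).mp hfm p0 hp0)
      | some p' =>
        obtain ⟨k, v⟩ := p'
        obtain ⟨hkd, hmax, hget⟩ := firstMax_some d m k v hfm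
        have hk_in : k ∈ weeks.filter (fun w => decide (w ≤ d)) :=
          (hmemf k).mpr ⟨pyDictGet_some_mem m k v hget, hkd⟩
        have hkw : k ≤ w := pairwise_getLast_le _ hpw w hlast k hk_in
        have hwk : w ≤ k := hp0k ▸ hmax p0 hp0 (by rw [hp0k]; exact hwd)
        have : w = k := le_antisymm hwk hkw
        subst this
        simp [hget]
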